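-- pv_equiv track=rewrite | github.com/juststarlight66-oss/taiwan-stock-radar | tasks/2255/update_tn_records.py | nth_trading_day_after
-- ===== SOURCE A (Python) =====
-- def nth_trading_day_after(scan_date_yyyymmdd: str, n: int, trading_dates: list):
--     """
--     Return the YYYYMMDD of the Nth trading day after scan_date.
--     Returns None if not yet available (future).
--     """
--     # Find scan_date index (or nearest prior date)
--     idx = None
--     for i, d in enumerate(trading_dates):
--         if d == scan_date_yyyymmdd:
--             idx = i
--             break
--     if idx is None:
--         # scan date may be a weekend/holiday — find nearest prior
--         for i, d in enumerate(trading_dates):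
--             if d > scan_date_yyyymmdd:
--                 idx = i - 1
--                 break
--         if idx is None or idx < 0:
--             return None
--
--     target_idx = idx + n
--     if target_idx >= len(trading_dates):
--         return None  # not yet available
--     return trading_dates[target_idx]
-- ===== SOURCE B (Python) =====
-- def nth_trading_day_after(scan_date_yyyymmdd: str, n: int, trading_dates: list):
--     """Single fused scan: one pass tracks both the first exact match (break)
--     and the first strictly-later date, instead of A's two separate passes."""
--     eq_idx = None
--     gt_idx = None
--     for i, d in enumerate(trading_dates):
--         if d == scan_date_yyyymmdd:
--             eq_idx = i
--             break
--         if gt_idx is None and d > scan_date_yyyymmdd: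
--             gt_idx = i
--     if eq_idx is not None:
--         idx = eq_idx
--     elif gt_idx is None or gt_idx == 0:
--         return None
--     else:
--         idx = gt_idx - 1
--     t = idx + n
--     return trading_dates[t] if t < len(trading_dates) else None
-- ===== Notes on version B (the rewrite author's own statement) =====
-- stated objective: alternative
-- what changed: A makes two separate passes over trading_dates (one for an exact match, a second full scan for the first later date); B makes a single fused pass that tracks both the first exact match (breaking there) and the first strictly-later date together, then resolves the index once.
import Mathlib
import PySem

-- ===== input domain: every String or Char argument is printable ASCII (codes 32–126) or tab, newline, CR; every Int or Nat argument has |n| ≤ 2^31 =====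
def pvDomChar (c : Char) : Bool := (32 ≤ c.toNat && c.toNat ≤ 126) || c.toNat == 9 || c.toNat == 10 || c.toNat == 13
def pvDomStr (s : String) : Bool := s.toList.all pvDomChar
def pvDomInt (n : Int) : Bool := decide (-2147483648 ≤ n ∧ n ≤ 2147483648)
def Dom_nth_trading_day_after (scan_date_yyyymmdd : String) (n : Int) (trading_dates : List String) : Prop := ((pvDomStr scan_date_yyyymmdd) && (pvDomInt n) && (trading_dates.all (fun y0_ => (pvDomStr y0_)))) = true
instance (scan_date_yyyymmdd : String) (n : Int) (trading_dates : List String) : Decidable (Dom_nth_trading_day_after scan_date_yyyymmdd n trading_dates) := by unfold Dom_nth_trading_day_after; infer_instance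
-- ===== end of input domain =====

-- B fuses A's two scans into ONE pass (tracking first exact match and first later date together); same return value, no speed claim.

-- ===== PORT A =====
-- first loop of A: index of the first element equal to scan (enumerate + break)
def pvFindEq (scan : String) : Nat → List String → Option Nat
  | _, [] => none
  | i, d :: r => if d = scan then some i else pvFindEq scan (i + 1) r

-- second loop of A: index of the first element strictly greater than scan
def pvFindGt (scan : String) : Nat → List String → Option Nat
  | _, [] => none
  | i, d :: r => if scan < d then some i else pvFindGt scan (i + 1) r

def nth_trading_day_after (scan_date_yyyymmdd : String) (n : Int) (trading_dates : List String) : Option String :=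
  match pvFindEq scan_date_yyyymmdd 0 trading_dates with
  | some i =>
    let target : Int := (i : Int) + n
    if (trading_dates.length : Int) ≤ target then none
    else PySem.List.pyGet? trading_dates target
  | none =>
    match pvFindGt scan_date_yyyymmdd 0 trading_dates with
    | none => none
    | some i =>
      let idx : Int := (i : Int) - 1
      if idx < 0 then none
      else
        let target : Int := idx + n
        if (trading_dates.length : Int) ≤ target then none
        else PySem.List.pyGet? trading_dates target

-- ===== PORT B =====
-- B's single pass: returns (eq_idx, gt_idx); stops at the first exact match,
-- keeping the first index whose date exceeds scan in the accumulator gt.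
def pvScan (scan : String) : Nat → Option Nat → List String → Option Nat × Option Nat
  | _, gt, [] => (none, gt)
  | i, gt, d :: r =>
    if d = scan then (some i, gt)
    else pvScan scan (i + 1)
      (match gt with
       | some _ => gt
       | none => if scan < d then some i else none) r

def nth_trading_day_after_alt (scan_date_yyyymmdd : String) (n : Int) (trading_dates : List String) : Option String :=
  let p := pvScan scan_date_yyyymmdd 0 none trading_dates
  let idx? : Option Int :=
    match p.1 with
    | some e => some (e : Int)
    | none =>
      match p.2 with
      | none => none
      | some g => if g = 0 then none else some ((g : Int) - 1)
  match idx? with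
  | none => none
  | some idx =>
    let t : Int := idx + n
    if t < (trading_dates.length : Int) then PySem.List.pyGet? trading_dates t else none

-- ===== PRECONDITION & SPEC =====
-- Pre_ excludes exactly the inputs where Python A raises IndexError: a scan position
-- resolves to idx ≥ 0 and idx + n < -len(trading_dates) (negative index underflow).
def pvPreB (scan : String) (n : Int) (td : List String) : Bool :=
  match td.idxOf? scan with
  | some i => decide (-(td.length : Int) ≤ (i : Int) + n)
  | none =>
    match td.findIdx? (fun d => scan < d) with
    | some (g + 1) => decide (-(td.length : Int) ≤ (g : Int) + n)
    | _ => true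

def Pre_nth_trading_day_after (scan_date_yyyymmdd : String) (n : Int) (trading_dates : List String) : Prop :=
  pvPreB scan_date_yyyymmdd n trading_dates = true
instance (scan_date_yyyymmdd : String) (n : Int) (trading_dates : List String) : Decidable (Pre_nth_trading_day_after scan_date_yyyymmdd n trading_dates) := by unfold Pre_nth_trading_day_after; infer_instance

def pvWitness_nth_trading_day_after : String × Int × List String :=
  ("20240105", 1, ["20240101", "20240105", "20240108"])

def Spec_nth_trading_day_after (scan_date_yyyymmdd : String) (n : Int) (trading_dates : List String) (out : Option String) : Prop := out = nth_trading_day_after_alt scan_date_yyyymmdd n trading_dates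
instance (scan_date_yyyymmdd : String) (n : Int) (trading_dates : List String) (out : Option String) : Decidable (Spec_nth_trading_day_after scan_date_yyyymmdd n trading_dates out) := by unfold Spec_nth_trading_day_after; infer_instance

-- ===== CLAIM (what is proved, stated in full; the proofs are below) =====
def Claim_equal_nth_trading_day_after : Prop := ∀ (scan_date_yyyymmdd : String) (n : Int) (trading_dates : List String), Dom_nth_trading_day_after scan_date_yyyymmdd n trading_dates → Pre_nth_trading_day_after scan_date_yyyymmdd n trading_dates → Spec_nth_trading_day_after scan_date_yyyymmdd n trading_dates (nth_trading_day_after scan_date_yyyymmdd n trading_dates)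

-- ===== LEMMAS AND PROOFS =====

theorem pvScan_fst (scan : String) : ∀ (l : List String) (i : Nat) (gt : Option Nat),
    (pvScan scan i gt l).1 = pvFindEq scan i l := by
  intro l
  induction l with
  | nil => intro i gt; simp [pvScan, pvFindEq]
  | cons d r ih =>
    intro i gt
    by_cases h : d = scan
    · simp [pvScan, pvFindEq, h]
    · simp only [pvScan, pvFindEq, h, if_false]
      exact ih _ _

theorem pvScan_snd_some (scan : String) : ∀ (l : List String) (i g : Nat),
    (pvScan scan i (some g) l).2 = some g := by
  intro l
  induction l with
  | nil => intro i g; simp [pvScan]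
  | cons d r ih =>
    intro i g
    by_cases h : d = scan
    · simp [pvScan, h]
    · simp only [pvScan, h, if_false]
      exact ih _ _

theorem pvScan_snd_none (scan : String) : ∀ (l : List String) (i : Nat),
    (pvScan scan i none l).1 = none →
    (pvScan scan i none l).2 = pvFindGt scan i l := by
  intro l
  induction l with
  | nil => intro i _; simp [pvScan, pvFindGt]
  | cons d r ih =>
    intro i h1
    by_cases heq : d = scan
    · exfalso; simp [pvScan, heq] at h1
    · by_cases hgt : scan < d
      · have hstep : pvScan scan i none (d :: r) = pvScan scan (i + 1) (some i) r := by
          simp [pvScan, heq, hgt]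
        rw [hstep, pvScan_snd_some]
        simp [pvFindGt, hgt]
      · have hstep : pvScan scan i none (d :: r) = pvScan scan (i + 1) none r := by
          simp [pvScan, heq, hgt]
        rw [hstep] at h1 ⊢
        simp only [pvFindGt, hgt, if_false]
        exact ih _ h1

theorem ports_agree (scan : String) (n : Int) (td : List String) :
    nth_trading_day_after scan n td = nth_trading_day_after_alt scan n td := by
  unfold nth_trading_day_after nth_trading_day_after_alt
  have hfst := pvScan_fst scan td 0 none
  cases he : pvFindEq scan 0 td with
  | some i =>
    rw [he] at hfst
    simp only [hfst]
    by_cases hlt : ((i : Int) + n) < (td.length : Int)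
    · simp [hlt, not_le.mpr hlt]
    · simp [hlt, not_lt.mp hlt]
  | none =>
    rw [he] at hfst
    have hsnd := pvScan_snd_none scan td 0 hfst
    simp only [hfst, hsnd]
    cases hg : pvFindGt scan 0 td with
    | none => simp
    | some g =>
      simp only
      cases g with
      | zero => simp
      | succ g' =>
        have hidx : ((g' + 1 : Nat) : Int) - 1 = (g' : Int) := by push_cast; omega
        simp only [hidx, Nat.succ_ne_zero, if_false]
        by_cases hlt : ((g' : Int) + n) < (td.length : Int)
        · simp [hlt, not_le.mpr hlt]
        · simp [hlt, not_lt.mp hlt]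

-- ===== VERDICT (by name: the statement is the Claim_ definition above) =====
theorem nth_trading_day_after_spec : Claim_equal_nth_trading_day_after := by
  intro scan n td _ _
  unfold Spec_nth_trading_day_after
  exact ports_agree scan n td
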